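-- pv_equiv track=rewrite | github.com/mikio999/codetree-TILs | 240225/함수를 이용한 온전수 판별/determining-the-whole-number-using-a-function.py | find_good_number
-- ===== SOURCE A (Python) =====
-- def find_good_number(a,b) :
--     count = 0
--     for i in range(a,b+1):
--         if i % 2 != 0 :
--             if i % 10 != 5 :
--                 if i % 3 != 0 :
--                     count += 1
--
--                 else:
--                     if i%9 == 0 :
--                         count += 1
--     return count
-- ===== SOURCE B (Python) =====
-- def find_good_number(a, b):
--     # O(1): the predicate depends only on i mod 90 (lcm of 2, 10, 9);
--     # count = prefix(b+1) - prefix(a) with 28 qualifying residues per period.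
--     if a > b:
--         return 0
--
--     def good(r):
--         return r % 2 != 0 and r % 10 != 5 and (r % 3 != 0 or r % 9 == 0)
--
--     def count_below(n):
--         q = n // 90
--         r = n % 90
--         return 28 * q + sum(1 for x in range(r) if good(x))
--
--     return count_below(b + 1) - count_below(a)
-- ===== Notes on version B (the rewrite author's own statement) =====
-- stated objective: faster
-- what changed: Replaced the linear scan over [a,b] by a closed-form count using periodicity of the predicate modulo 90 (28 qualifying residues per period), so B does O(1) work instead of O(b-a).
import Mathlib
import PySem

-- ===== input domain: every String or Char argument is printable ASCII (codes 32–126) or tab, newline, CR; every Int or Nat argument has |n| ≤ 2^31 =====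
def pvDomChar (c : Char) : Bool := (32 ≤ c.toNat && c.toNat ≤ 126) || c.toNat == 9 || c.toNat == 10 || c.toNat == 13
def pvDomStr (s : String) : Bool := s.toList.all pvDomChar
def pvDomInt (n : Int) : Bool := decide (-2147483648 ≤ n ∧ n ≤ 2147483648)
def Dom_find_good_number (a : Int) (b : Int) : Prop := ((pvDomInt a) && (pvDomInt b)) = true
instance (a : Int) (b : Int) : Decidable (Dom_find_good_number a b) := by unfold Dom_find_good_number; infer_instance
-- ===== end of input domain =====

-- B replaces A's linear scan over [a,b] by a closed-form count via periodicity mod 90 (objective: faster).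

-- ===== PORT A =====
def find_good_number (a : Int) (b : Int) : Int :=
  (PySem.List.pyRange a (b + 1) 1).foldl
    (fun count i =>
      if PySem.Int.mod i 2 ≠ 0 then
        if PySem.Int.mod i 10 ≠ 5 then
          if PySem.Int.mod i 3 ≠ 0 then count + 1
          else if PySem.Int.mod i 9 = 0 then count + 1 else count
        else count
      else count) 0

-- ===== PORT B =====
def pvGood (r : Int) : Bool :=
  (PySem.Int.mod r 2 != 0) && (PySem.Int.mod r 10 != 5)
    && ((PySem.Int.mod r 3 != 0) || (PySem.Int.mod r 9 == 0))

def pvCountBelow (n : Int) : Int :=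
  let q := PySem.Int.floordiv n 90
  let r := PySem.Int.mod n 90
  28 * q + (PySem.List.pyRange 0 r 1).foldl (fun c x => if pvGood x then c + 1 else c) 0

def find_good_number_alt (a : Int) (b : Int) : Int :=
  if a > b then 0 else pvCountBelow (b + 1) - pvCountBelow a

-- ===== PRECONDITION & SPEC =====
def Spec_find_good_number (a : Int) (b : Int) (out : Int) : Prop := out = find_good_number_alt a b
instance (a : Int) (b : Int) (out : Int) : Decidable (Spec_find_good_number a b out) := by unfold Spec_find_good_number; infer_instance

-- ===== CLAIM (what is proved, stated in full; the proofs are below) =====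
def Claim_equal_find_good_number : Prop := ∀ (a : Int) (b : Int), Dom_find_good_number a b → Spec_find_good_number a b (find_good_number a b)

-- ===== LEMMAS AND PROOFS =====

-- the prefix-count inside pvCountBelow, as its own name for the proofs
def pvPf (r : Int) : Int :=
  (PySem.List.pyRange 0 r 1).foldl (fun c x => if pvGood x then c + 1 else c) 0

lemma pvCountBelow_eq (n : Int) : pvCountBelow n = 28 * (n / 90) + pvPf (n % 90) := by
  unfold pvCountBelow pvPf
  rw [PySem.Int.floordiv_eq_ediv_of_pos (by norm_num), PySem.Int.mod_eq_emod_of_pos (by norm_num)]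

-- A's step adds exactly (if pvGood i then 1 else 0)
lemma stepA_eq (c i : Int) :
    (if PySem.Int.mod i 2 ≠ 0 then
       if PySem.Int.mod i 10 ≠ 5 then
         if PySem.Int.mod i 3 ≠ 0 then c + 1
         else if PySem.Int.mod i 9 = 0 then c + 1 else c
       else c
     else c) = c + (if pvGood i then 1 else 0) := by
  simp only [pvGood, Bool.and_eq_true, Bool.or_eq_true, bne_iff_ne, beq_iff_eq]
  split_ifs <;> simp_all

lemma pvGood_emod (n : Int) : pvGood (n % 90) = pvGood n := by
  unfold pvGood
  rw [PySem.Int.mod_eq_emod_of_pos (a := n % 90) (by norm_num),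
      PySem.Int.mod_eq_emod_of_pos (a := n % 90) (b := 10) (by norm_num),
      PySem.Int.mod_eq_emod_of_pos (a := n % 90) (b := 3) (by norm_num),
      PySem.Int.mod_eq_emod_of_pos (a := n % 90) (b := 9) (by norm_num),
      PySem.Int.mod_eq_emod_of_pos (a := n) (by norm_num),
      PySem.Int.mod_eq_emod_of_pos (a := n) (b := 10) (by norm_num),
      PySem.Int.mod_eq_emod_of_pos (a := n) (b := 3) (by norm_num),
      PySem.Int.mod_eq_emod_of_pos (a := n) (b := 9) (by norm_num),
      Int.emod_emod_of_dvd n (by norm_num : (2:Int) ∣ 90),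
      Int.emod_emod_of_dvd n (by norm_num : (10:Int) ∣ 90),
      Int.emod_emod_of_dvd n (by norm_num : (3:Int) ∣ 90),
      Int.emod_emod_of_dvd n (by norm_num : (9:Int) ∣ 90)]

lemma pvPf_succ (r : Int) (h0 : 0 ≤ r) : pvPf (r + 1) = pvPf r + (if pvGood r then 1 else 0) := by
  unfold pvPf
  rw [PySem.List.pyRange_one_succ_right h0, List.foldl_append]
  simp only [List.foldl_cons, List.foldl_nil]
  split_ifs <;> ring

lemma pvCountBelow_succ (n : Int) :
    pvCountBelow (n + 1) = pvCountBelow n + (if pvGood n then 1 else 0) := by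
  rw [pvCountBelow_eq, pvCountBelow_eq, ← pvGood_emod n]
  have hr0 : 0 ≤ n % 90 := Int.emod_nonneg n (by norm_num)
  have hr1 : n % 90 < 90 := Int.emod_lt_of_pos n (by norm_num)
  by_cases h : n % 90 = 89
  · have h1 : (n + 1) % 90 = 0 := by omega
    have h2 : (n + 1) / 90 = n / 90 + 1 := by omega
    rw [h1, h2, h]
    have hPf0 : pvPf 0 = 0 := by decide
    have hPf89 : pvPf 89 = 27 := by decide
    have hg : pvGood 89 = true := by decide
    rw [hPf0, hPf89, hg]
    norm_num; ring
  · have h1 : (n + 1) % 90 = n % 90 + 1 := by omega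
    have h2 : (n + 1) / 90 = n / 90 := by omega
    rw [h1, h2, pvPf_succ _ hr0]
    ring

lemma foldA_eq (k : Nat) : ∀ (a c : Int),
    (PySem.List.pyRange a (a + k) 1).foldl
      (fun count i =>
        if PySem.Int.mod i 2 ≠ 0 then
          if PySem.Int.mod i 10 ≠ 5 then
            if PySem.Int.mod i 3 ≠ 0 then count + 1
            else if PySem.Int.mod i 9 = 0 then count + 1 else count
          else count
        else count) c = c + (pvCountBelow (a + k) - pvCountBelow a) := by
  induction k with
  | zero =>
      intro a c
      simp
  | succ m ih =>
      intro a c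
      have hle : a ≤ a + (m : Int) := by omega
      have hcast : (a : Int) + ((m + 1 : Nat) : Int) = (a + (m : Int)) + 1 := by push_cast; ring
      rw [hcast, PySem.List.pyRange_one_succ_right hle, List.foldl_append, ih a c]
      simp only [List.foldl_cons, List.foldl_nil]
      rw [stepA_eq, pvCountBelow_succ]
      ring

-- ===== VERDICT (by name: the statement is the Claim_ definition above) =====
theorem find_good_number_spec : Claim_equal_find_good_number := by
  intro a b _
  unfold Spec_find_good_number find_good_number find_good_number_alt
  by_cases hab : a > b
  · rw [PySem.List.pyRange_one_eq_nil (by omega : b + 1 ≤ a)]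
    simp [hab]
  · have hk : b + 1 = a + ((b + 1 - a).toNat : Int) := by omega
    rw [hk, foldA_eq, ← hk]
    simp [hab]
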